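-- pv_equiv track=rewrite | github.com/TabithaSW/Steam_SentimentAnalysis | utils/tokenize_test_train.py | handle_negations
-- ===== SOURCE A (Python) =====
-- def handle_negations(input_text):
--     negation_words = ['not', 'no', 'never', 'neither', 'nor', 'cannot']
--     negated_tokens = []
--     tokens = input_text.split()
--     skip_next = False
--     for i, token in enumerate(tokens):
--         if skip_next:
--             skip_next = False
--             continue
--         if token in negation_words and i < len(tokens) - 1:
--             negated_tokens.append(token + '_' + tokens[i + 1])
--             skip_next = True
--         else:
--             negated_tokens.append(token)
--     return ' '.join(negated_tokens)
-- ===== SOURCE B (Python) =====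
-- def handle_negations(input_text):
--     NEG = {'not', 'no', 'never', 'neither', 'nor', 'cannot'}
--     tokens = input_text.split()
--     n = len(tokens)
--     out = []
--     k = 0
--     while k < n:
--         if tokens[k] not in NEG:
--             out.append(tokens[k])
--             k += 1
--             continue
--         # maximal run of consecutive negation words starting at k
--         r = k
--         while r < n and tokens[r] in NEG:
--             r += 1
--         run = tokens[k:r]
--         # within the run the greedy pairing is forced: (0,1), (2,3), ...
--         for a, b in zip(run[0::2], run[1::2]):
--             out.append(a + '_' + b)
--         if len(run) % 2 == 1:
--             if r < n:
--                 out.append(run[-1] + '_' + tokens[r])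
--                 r += 1
--             else:
--                 out.append(run[-1])
--         k = r
--     return ' '.join(out)
-- ===== Notes on version B (the rewrite author's own statement) =====
-- stated objective: alternative
-- what changed: Instead of A's token-by-token scan with a skip_next flag, B segments the token list into maximal runs of consecutive negation words, pairs each run up wholesale with strided slices (zip(run[0::2], run[1::2])), and merges an odd leftover with the token that follows the run.
import Mathlib
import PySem

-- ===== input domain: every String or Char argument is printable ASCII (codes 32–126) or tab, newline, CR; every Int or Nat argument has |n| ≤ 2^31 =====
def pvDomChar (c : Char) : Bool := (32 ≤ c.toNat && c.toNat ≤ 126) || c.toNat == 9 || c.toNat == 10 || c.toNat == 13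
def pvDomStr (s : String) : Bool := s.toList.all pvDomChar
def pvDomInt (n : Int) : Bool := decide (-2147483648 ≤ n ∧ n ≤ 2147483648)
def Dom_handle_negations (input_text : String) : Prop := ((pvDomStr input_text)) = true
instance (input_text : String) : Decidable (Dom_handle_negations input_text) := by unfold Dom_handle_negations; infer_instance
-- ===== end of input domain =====

-- B replaces A's token-by-token scan with a skip flag by run segmentation: it finds each
-- maximal run of consecutive negation words and pairs it up with strided slices (objective: alternative; same cost).

-- ===== PORT A =====
def negationWordsA : List String := ["not", "no", "never", "neither", "nor", "cannot"]

-- the body of A's for-loop, over state (negated_tokens, skip_next)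
def stepA (tokens : List String) (st : List String × Bool) (p : Int × String) : List String × Bool :=
  if st.2 then (st.1, false)
  else if p.2 ∈ negationWordsA ∧ p.1 < (tokens.length : Int) - 1 then
    (st.1 ++ [p.2 ++ "_" ++ (PySem.List.pyGet? tokens (p.1 + 1)).getD ""], true)
  else (st.1 ++ [p.2], false)

def handle_negations (input_text : String) : String :=
  let tokens := PySem.Str.split₀ input_text
  let st := (PySem.List.enumerate tokens 0).foldl (stepA tokens) ([], false)
  PySem.Str.join " " st.1

-- ===== PORT B =====
def negSetB : PySem.Set String :=
  PySem.Set.ofList ["not", "no", "never", "neither", "nor", "cannot"]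

-- B's inner while loop: advance r over the maximal run of negation words
def runEnd (tokens : List String) (n r : Int) : Int :=
  if h : r < n ∧ (PySem.List.pyGet? tokens r).getD "" ∈ negSetB then runEnd tokens n (r + 1) else r
termination_by (n - r).toNat
decreasing_by omega

-- termination fact for outerLoopB (cited in its decreasing_by)
theorem runEnd_ge (tokens : List String) (n : Int) : ∀ r : Int, r ≤ runEnd tokens n r := by
  intro r
  induction r using runEnd.induct tokens n with
  | case1 r h ih => rw [runEnd, dif_pos h]; omega
  | case2 r h => rw [runEnd, dif_neg h]

theorem runEnd_ge_succ (tokens : List String) (n k : Int)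
    (h1 : k < n) (h2 : (PySem.List.pyGet? tokens k).getD "" ∈ negSetB) :
    k + 1 ≤ runEnd tokens n k := by
  rw [runEnd, dif_pos ⟨h1, h2⟩]; exact runEnd_ge tokens n (k + 1)

-- B's outer while loop over the cursor k
def outerLoopB (tokens : List String) (n : Int) (out : List String) (k : Int) : List String :=
  if _hk : k < n then
    let t := (PySem.List.pyGet? tokens k).getD ""
    if ht : t ∉ negSetB then
      outerLoopB tokens n (out ++ [t]) (k + 1)
    else
      let r := runEnd tokens n k
      let run := PySem.List.slice tokens (some k) (some r)
      let pairs := (((PySem.List.slice? run (some 0) none 2).getD []).zip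
                    ((PySem.List.slice? run (some 1) none 2).getD [])).map
                    (fun p => p.1 ++ "_" ++ p.2)
      let out2 := out ++ pairs
      if PySem.Int.mod (run.length : Int) 2 = 1 then
        if r < n then
          outerLoopB tokens n
            (out2 ++ [((PySem.List.pyGet? run (-1)).getD "") ++ "_" ++ (PySem.List.pyGet? tokens r).getD ""])
            (r + 1)
        else
          outerLoopB tokens n (out2 ++ [(PySem.List.pyGet? run (-1)).getD ""]) r
      else
        outerLoopB tokens n out2 r
  else out
termination_by (n - k).toNat
decreasing_by
  · omega
  · have := runEnd_ge_succ tokens n k _hk (by simpa using ht); omega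
  · have := runEnd_ge_succ tokens n k _hk (by simpa using ht); omega
  · have := runEnd_ge_succ tokens n k _hk (by simpa using ht); omega

def handle_negations_alt (input_text : String) : String :=
  let tokens := PySem.Str.split₀ input_text
  PySem.Str.join " " (outerLoopB tokens tokens.length [] 0)

-- ===== PRECONDITION & SPEC =====
def Spec_handle_negations (input_text : String) (out : String) : Prop := out = handle_negations_alt input_text
instance (input_text : String) (out : String) : Decidable (Spec_handle_negations input_text out) := by unfold Spec_handle_negations; infer_instance

-- ===== CLAIM (what is proved, stated in full; the proofs are below) =====
def Claim_equal_handle_negations : Prop := ∀ (input_text : String), Dom_handle_negations input_text → Spec_handle_negations input_text (handle_negations input_text)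

-- ===== LEMMAS AND PROOFS =====

-- common characterisation: merge each negation word with the following token
def mrg : List String → List String
  | [] => []
  | [t] => [t]
  | t :: u :: rest =>
    if t ∈ negationWordsA then (t ++ "_" ++ u) :: mrg rest
    else t :: mrg (u :: rest)

-- ---- A-side: A's fold computes mrg ----
theorem foldA_eq (tokens : List String) :
    ∀ (ts pre acc : List String), tokens = pre ++ ts →
    (PySem.List.enumerate ts (pre.length : Int)).foldl (stepA tokens) (acc, false)
      = (acc ++ mrg ts, false) := by
  intro ts
  induction ts using mrg.induct with
  | case1 => intro pre acc _; simp [mrg]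
  | case2 t =>
    intro pre acc htok
    have hlen : (tokens.length : Int) = (pre.length : Int) + 1 := by
      subst htok; simp
    have hcond : ¬ ((pre.length : Int) < (tokens.length : Int) - 1) := by omega
    rw [PySem.List.enumerate_cons, PySem.List.enumerate_nil]
    simp [stepA, hcond, mrg]
  | case3 t u rest hneg ih =>
    intro pre acc htok
    have hlen : (tokens.length : Int) = (pre.length : Int) + 2 + rest.length := by
      subst htok; simp; omega
    have hget1 : PySem.List.pyGet? tokens ((pre.length : Int) + 1) = some u := by
      have : tokens = (pre ++ [t]) ++ u :: rest := by simp [htok]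
      rw [this, show ((pre.length : Int) + 1) = (((pre ++ [t]).length : Int)) by simp]
      exact PySem.List.pyGet?_append_length _ _ _
    rw [PySem.List.enumerate_cons, PySem.List.enumerate_cons]
    simp only [List.foldl_cons]
    have s1 : stepA tokens (acc, false) ((pre.length : Int), t)
        = (acc ++ [t ++ "_" ++ u], true) := by
      simp [stepA, hneg, hlen, hget1]
      omega
    have s2 : stepA tokens (acc ++ [t ++ "_" ++ u], true) ((pre.length : Int) + 1, u)
        = (acc ++ [t ++ "_" ++ u], false) := by
      simp [stepA]
    rw [s1, s2]
    have ihr := ih (pre ++ [t, u]) (acc ++ [t ++ "_" ++ u]) (by simp [htok])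
    have : ((pre ++ [t, u]).length : Int) = (pre.length : Int) + 1 + 1 := by
      simp; omega
    rw [this] at ihr
    rw [ihr]
    simp [mrg, hneg]
  | case4 t u rest hneg ih =>
    intro pre acc htok
    rw [PySem.List.enumerate_cons]
    simp only [List.foldl_cons]
    have hlen : (tokens.length : Int) = (pre.length : Int) + 2 + rest.length := by
      subst htok; simp; omega
    have s1 : stepA tokens (acc, false) ((pre.length : Int), t) = (acc ++ [t], false) := by
      simp [stepA, hneg]
    rw [s1]
    have ihr := ih (pre ++ [t]) (acc ++ [t]) (by simp [htok])
    have : ((pre ++ [t]).length : Int) = (pre.length : Int) + 1 := by simp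
    rw [this] at ihr
    rw [ihr]
    simp [mrg, hneg]

-- ---- B-side helpers (proof only) ----

theorem mem_negSetB_iff (t : String) : t ∈ negSetB ↔ t ∈ negationWordsA := by
  simp [negSetB, negationWordsA, PySem.Set.mem_ofList]

-- length of the maximal all-negation prefix
def negPrefixLen : List String → Nat
  | [] => 0
  | t :: ts => if t ∈ negationWordsA then negPrefixLen ts + 1 else 0

-- greedy pairing inside a run
def pairsOf : List String → List String
  | [] => []
  | [_] => []
  | a :: b :: rest => (a ++ "_" ++ b) :: pairsOf rest

def lastOf : List String → String
  | [] => ""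
  | [t] => t
  | _ :: b :: rest => lastOf (b :: rest)

def evensOf : List String → List String
  | [] => []
  | [a] => [a]
  | a :: _ :: rest => a :: evensOf rest

def oddsOf : List String → List String
  | [] => []
  | [_] => []
  | _ :: b :: rest => b :: oddsOf rest

theorem negPrefixLen_le (ts : List String) : negPrefixLen ts ≤ ts.length := by
  induction ts with
  | nil => simp [negPrefixLen]
  | cons t ts ih =>
    by_cases h : t ∈ negationWordsA
    · simp [negPrefixLen, h]; omega
    · simp [negPrefixLen, h]

theorem mem_take_negPrefixLen : ∀ (ts : List String) (x : String),
    x ∈ ts.take (negPrefixLen ts) → x ∈ negationWordsA := by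
  intro ts
  induction ts with
  | nil => simp
  | cons t ts ih =>
    intro x hx
    by_cases h : t ∈ negationWordsA
    · simp [negPrefixLen, h] at hx
      rcases hx with hx | hx
      · simpa [hx] using h
      · exact ih x hx
    · simp [negPrefixLen, h] at hx
  
-- runEnd computes k + (length of the negation-word prefix of drop k)
theorem runEnd_eq (toks : List String) : ∀ (r : Int), 0 ≤ r →
    runEnd toks (toks.length : Int) r = r + (negPrefixLen (toks.drop r.toNat) : Int) := by
  intro r
  induction r using runEnd.induct toks (toks.length : Int) with
  | case1 r h ih =>
    intro hr
    rw [runEnd, dif_pos h]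
    rw [ih (by omega)]
    have hlt : r.toNat < toks.length := by omega
    have hget : PySem.List.pyGet? toks r = some toks[r.toNat] := by
      have := PySem.List.pyGet?_eq_some_getElem (xs := toks) (i := r) hr (by omega)
      simpa using this
    have hneg : toks[r.toNat] ∈ negationWordsA := by
      rw [← mem_negSetB_iff]
      have := h.2
      rwa [hget] at this
    have hdrop : toks.drop r.toNat = toks[r.toNat] :: toks.drop (r.toNat + 1) :=
      List.drop_eq_getElem_cons hlt
    rw [hdrop, show (r + 1).toNat = r.toNat + 1 from by omega]
    simp [negPrefixLen, hneg]
    omega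
  | case2 r h =>
    intro hr
    rw [runEnd, dif_neg h]
    by_cases h1 : r < (toks.length : Int)
    · have hlt : r.toNat < toks.length := by omega
      have hget : PySem.List.pyGet? toks r = some toks[r.toNat] := by
        have := PySem.List.pyGet?_eq_some_getElem (xs := toks) (i := r) hr (by omega)
        simpa using this
      have hneg : toks[r.toNat] ∉ negationWordsA := by
        rw [← mem_negSetB_iff]
        intro hmem
        exact h ⟨h1, by rw [hget]; exact hmem⟩
      have hdrop : toks.drop r.toNat = toks[r.toNat] :: toks.drop (r.toNat + 1) :=
        List.drop_eq_getElem_cons hlt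
      rw [hdrop]
      simp [negPrefixLen, hneg]
    · have hdrop : toks.drop r.toNat = [] := List.drop_eq_nil_of_le (by omega)
      rw [hdrop]
      simp [negPrefixLen]

-- mrg on a run of negation words followed by a tail
theorem mrg_neg_run : ∀ (run tail : List String), (∀ x ∈ run, x ∈ negationWordsA) →
    mrg (run ++ tail) =
      pairsOf run ++
        (if run.length % 2 = 1 then
          (match tail with
           | [] => [lastOf run]
           | t :: tl => (lastOf run ++ "_" ++ t) :: mrg tl)
         else mrg tail) := by
  intro run
  induction run using pairsOf.induct with
  | case1 =>
    intro tail _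
    simp [pairsOf]
  | case2 a =>
    intro tail hmem
    have ha : a ∈ negationWordsA := hmem a (by simp)
    cases tail with
    | nil => simp [pairsOf, mrg, lastOf]
    | cons t tl => simp [pairsOf, mrg, lastOf, ha]
  | case3 a b rest ih =>
    intro tail hmem
    have ha : a ∈ negationWordsA := hmem a (by simp)
    have hrest : ∀ x ∈ rest, x ∈ negationWordsA := by
      intro x hx; exact hmem x (by simp [hx])
    have step : mrg ((a :: b :: rest) ++ tail) = (a ++ "_" ++ b) :: mrg (rest ++ tail) := by
      simp [mrg, ha]
    rw [step, ih tail hrest]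
    have hlen : (a :: b :: rest).length % 2 = rest.length % 2 := by simp; omega
    rw [hlen]
    by_cases hpar : rest.length % 2 = 1
    · have hne : rest ≠ [] := by intro h; subst h; simp at hpar
      obtain ⟨c, r', rfl⟩ := List.exists_cons_of_ne_nil hne
      simp [pairsOf, lastOf]
    · simp [pairsOf, hpar]

theorem evens_aux : ∀ xs : List String,
    List.filterMap (fun k => xs[2 * k]?) (List.range ((xs.length + 1) / 2)) = evensOf xs := by
  intro xs
  induction xs using evensOf.induct with
  | case1 => simp [evensOf]
  | case2 a => simp [evensOf]
  | case3 a b rest ih =>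
    have hc : ((a :: b :: rest).length + 1) / 2 = (rest.length + 1) / 2 + 1 := by
      simp; omega
    rw [hc, List.range_succ_eq_map, List.filterMap_cons, List.filterMap_map]
    have hf : ((fun k => (a :: b :: rest)[2 * k]?) ∘ Nat.succ) = fun k => rest[2 * k]? := by
      funext k
      have h2 : 2 * Nat.succ k = 2 * k + 1 + 1 := by omega
      simp [Function.comp, h2]
    simp only [hf, ih]
    simp [evensOf]

theorem odds_aux : ∀ xs : List String,
    List.filterMap (fun k => xs[2 * k + 1]?) (List.range (xs.length / 2)) = oddsOf xs := by
  intro xs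
  induction xs using oddsOf.induct with
  | case1 => simp [oddsOf]
  | case2 a => simp [oddsOf]
  | case3 a b rest ih =>
    have hc : (a :: b :: rest).length / 2 = rest.length / 2 + 1 := by simp; omega
    rw [hc, List.range_succ_eq_map, List.filterMap_cons, List.filterMap_map]
    have hf : ((fun k => (a :: b :: rest)[2 * k + 1]?) ∘ Nat.succ) = fun k => rest[2 * k + 1]? := by
      funext k
      have h2 : 2 * Nat.succ k + 1 = 2 * k + 1 + 1 + 1 := by omega
      simp [Function.comp, h2]
    simp only [hf, ih]
    simp [oddsOf]

-- the strided slices are evensOf / oddsOf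
theorem stride0_eq (xs : List String) :
    (PySem.List.slice? xs (some 0) none 2).getD [] = evensOf xs := by
  simp only [PySem.List.slice?, PySem.List.sliceIndices]
  norm_num
  have hc : (if 0 < xs.length then (((xs.length : Int) + 2 - 1) / 2).toNat else 0)
      = (xs.length + 1) / 2 := by split <;> omega
  rw [hc, ← evens_aux xs]
  apply List.filterMap_congr
  intro k _
  have h1 : (2 * (k : Int)).toNat = 2 * k := by omega
  rw [h1]

theorem stride1_eq (xs : List String) :
    (PySem.List.slice? xs (some 1) none 2).getD [] = oddsOf xs := by
  simp only [PySem.List.slice?, PySem.List.sliceIndices]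
  norm_num
  cases xs with
  | nil => simp [oddsOf]
  | cons a rest =>
    have hmin : min 1 ((a :: rest).length : Int) = 1 := by simp
    rw [hmin]
    have hc : (if 1 < (a :: rest).length then ((((a :: rest).length : Int) - 1 + 2 - 1) / 2).toNat else 0)
        = (a :: rest).length / 2 := by
      simp only [List.length_cons]; split <;> omega
    rw [hc, ← odds_aux (a :: rest)]
    apply List.filterMap_congr
    intro k _
    have h1 : (1 + 2 * (k : Int)).toNat = 2 * k + 1 := by omega
    rw [h1]

theorem zip_evens_odds (xs : List String) :
    ((evensOf xs).zip (oddsOf xs)).map (fun p => p.1 ++ "_" ++ p.2) = pairsOf xs := by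
  induction xs using pairsOf.induct with
  | case1 => simp [evensOf, oddsOf, pairsOf]
  | case2 a => simp [evensOf, oddsOf, pairsOf]
  | case3 a b rest ih => simp [evensOf, oddsOf, pairsOf, ih]

theorem pyGet?_neg_one (xs : List String) (h : xs ≠ []) :
    (PySem.List.pyGet? xs (-1)).getD "" = lastOf xs := by
  induction xs using lastOf.induct with
  | case1 => simp at h
  | case2 t => simp [PySem.List.pyGet?, PySem.List.pyIdx?, lastOf]
  | case3 a b rest ih =>
    have hprev := ih (by simp)
    simp [PySem.List.pyGet?, PySem.List.pyIdx?, lastOf] at hprev ⊢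
    exact hprev

theorem mrg_cons_not_neg (t : String) (rest : List String) (h : t ∉ negationWordsA) :
    mrg (t :: rest) = t :: mrg rest := by
  cases rest with
  | nil => simp [mrg]
  | cons u tl => simp [mrg, h]

-- B's outer loop computes mrg
theorem outerLoopB_eq (m : Nat) : ∀ (toks out : List String) (k : Int), 0 ≤ k →
    toks.length - k.toNat ≤ m →
    outerLoopB toks (toks.length : Int) out k = out ++ mrg (toks.drop k.toNat) := by
  induction m with
  | zero =>
    intro toks out k hk0 hm
    rw [outerLoopB]
    have hnk : ¬ (k < (toks.length : Int)) := by omega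
    rw [dif_neg hnk]
    rw [List.drop_eq_nil_of_le (by omega)]
    simp [mrg]
  | succ m ih =>
    intro toks out k hk0 hm
    rw [outerLoopB]
    by_cases hk : k < (toks.length : Int)
    · rw [dif_pos hk]
      have hlt : k.toNat < toks.length := by omega
      have hget : PySem.List.pyGet? toks k = some toks[k.toNat] := by
        have := PySem.List.pyGet?_eq_some_getElem (xs := toks) (i := k) hk0 (by omega)
        simpa using this
      have hts : toks.drop k.toNat = toks[k.toNat] :: toks.drop (k.toNat + 1) :=
        List.drop_eq_getElem_cons hlt
      by_cases hneg : toks[k.toNat] ∈ negationWordsA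
      · -- negation-run branch
        have hmem : toks[k.toNat] ∈ negSetB := (mem_negSetB_iff _).mpr hneg
        rw [hget]
        simp only [Option.getD_some]
        rw [dif_neg (not_not_intro hmem)]
        -- the run
        have hr : runEnd toks (toks.length : Int) k
            = k + (negPrefixLen (toks.drop k.toNat) : Int) := runEnd_eq toks k hk0
        set p := negPrefixLen (toks.drop k.toNat) with hp
        have hple : p ≤ (toks.drop k.toNat).length := negPrefixLen_le _
        have hdlen : (toks.drop k.toNat).length = toks.length - k.toNat := by simp
        have hp1 : 1 ≤ p := by
          rw [hp, hts]; simp [negPrefixLen, hneg]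
        have hslice : PySem.List.slice toks (some k) (some (k + (p : Int)))
            = (toks.drop k.toNat).take p := by
          rw [PySem.List.slice_toNat toks hk0 (by omega)]
          congr 1
          omega
        rw [hr, hslice]
        set run := (toks.drop k.toNat).take p with hrun
        have hrunlen : run.length = p := by
          rw [hrun]; simp; omega
        have hrunne : run ≠ [] := by
          intro hnil; rw [hnil] at hrunlen; simp at hrunlen; omega
        have hmrg := mrg_neg_run run ((toks.drop k.toNat).drop p)
          (mem_take_negPrefixLen (toks.drop k.toNat))
        rw [List.take_append_drop] at hmrg
        have hpairs : (((PySem.List.slice? run (some 0) none 2).getD []).zip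
              ((PySem.List.slice? run (some 1) none 2).getD [])).map
              (fun q => q.1 ++ "_" ++ q.2) = pairsOf run := by
          rw [stride0_eq, stride1_eq, zip_evens_odds]
        have hmod : (PySem.Int.mod ((run.length : Int)) 2 = 1) ↔ (run.length % 2 = 1) := by
          rw [PySem.Int.mod_eq_emod_of_pos (by norm_num)]
          omega
        rw [hpairs]
        by_cases hpar : run.length % 2 = 1
        · rw [if_pos (hmod.mpr hpar)]
          rw [pyGet?_neg_one run hrunne]
          by_cases htail : k + (p : Int) < (toks.length : Int)
          · rw [if_pos htail]
            have htlt : k.toNat + p < toks.length := by omega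
            have hdd : toks.drop (k.toNat + p)
                = toks[k.toNat + p] :: toks.drop (k.toNat + p + 1) :=
              List.drop_eq_getElem_cons htlt
            have hdd2 : (toks.drop k.toNat).drop p = toks.drop (k.toNat + p) := by
              rw [List.drop_drop]
            have hgetr : PySem.List.pyGet? toks (k + (p : Int))
                = some toks[k.toNat + p] := by
              have := PySem.List.pyGet?_eq_some_getElem (xs := toks) (i := k + (p : Int))
                (by omega) (by omega)
              simpa [show (k + (p : Int)).toNat = k.toNat + p from by omega] using this
            rw [hgetr]
            simp only [Option.getD_some]
            rw [ih toks _ (k + (p : Int) + 1) (by omega) (by omega)]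
            rw [show (k + (p : Int) + 1).toNat = k.toNat + p + 1 from by omega]
            rw [hmrg, hdd2, hdd]
            simp [hpar]
          · rw [if_neg htail]
            rw [ih toks _ (k + (p : Int)) (by omega) (by omega)]
            rw [show (k + (p : Int)).toNat = k.toNat + p from by omega]
            have hdd2 : (toks.drop k.toNat).drop p = toks.drop (k.toNat + p) := by
              rw [List.drop_drop]
            have hdnil : toks.drop (k.toNat + p) = [] := List.drop_eq_nil_of_le (by omega)
            rw [hmrg, hdd2, hdnil]
            simp [hpar, mrg]
        · rw [if_neg (fun hx => hpar (hmod.mp hx))]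
          rw [ih toks _ (k + (p : Int)) (by omega) (by omega)]
          rw [show (k + (p : Int)).toNat = k.toNat + p from by omega]
          have hdd2 : (toks.drop k.toNat).drop p = toks.drop (k.toNat + p) := by
            rw [List.drop_drop]
          rw [hmrg, hdd2]
          simp [hpar]
      · -- plain-token branch
        have hmem : toks[k.toNat] ∉ negSetB := fun hx => hneg ((mem_negSetB_iff _).mp hx)
        rw [hget]
        simp only [Option.getD_some]
        rw [dif_pos hmem]
        rw [ih toks _ (k + 1) (by omega) (by omega)]
        rw [show (k + 1).toNat = k.toNat + 1 from by omega]
        rw [hts, mrg_cons_not_neg _ _ hneg]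
        simp
    · rw [dif_neg hk]
      rw [List.drop_eq_nil_of_le (by omega)]
      simp [mrg]

-- ===== VERDICT (by name: the statement is the Claim_ definition above) =====
theorem handle_negations_spec : Claim_equal_handle_negations := by
  intro input_text _
  unfold Spec_handle_negations handle_negations handle_negations_alt
  set toks := PySem.Str.split₀ input_text with htoks
  have hA := foldA_eq toks toks [] [] (by simp)
  have hB := outerLoopB_eq toks.length toks [] 0 le_rfl (by omega)
  simp only [List.length_nil, Nat.cast_zero] at hA
  simp only [Int.toNat_zero, List.drop_zero, List.nil_append] at hB
  simp [hA, hB]
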